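-- pv_equiv track=rewrite | github.com/combikms/PS_BOJ | 그리디알고리즘/1036.py | sum_values
-- ===== SOURCE A (Python) =====
-- def sum_values(numbers, chosen):
--     total_sum = 0
--     for num in numbers:
--         num_value = 0
--         base = 1
--         for digit in reversed(num):
--             if digit.isdigit():
--                 value = int(digit)
--             else:
--                 value = 10 + ord(digit) - ord('A')
--             if digit in chosen:
--                 value = 35
--             num_value += value * base
--             base *= 36
--         total_sum += num_value
--     return total_sum
-- ===== SOURCE B (Python) =====
-- def sum_values(numbers, chosen):
--     boost = {c for c in chosen if len(c) == 1}
--     def val(ch):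
--         if ch in boost:
--             return 35
--         return int(ch) if ch.isdigit() else 10 + ord(ch) - ord('A')
--     total = 0
--     for num in numbers:
--         v = 0
--         for ch in num:
--             v = v * 36 + val(ch)
--         total += v
--     return total
-- ===== Notes on version B (the rewrite author's own statement) =====
-- stated objective: simpler
-- what changed: Replaces the reversed inner loop that maintains an explicit positional base multiplier with a forward Horner-scheme accumulation (v = v*36 + digit), and precomputes the set of single-character chosen strings once instead of scanning the chosen list per digit.
import Mathlib
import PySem

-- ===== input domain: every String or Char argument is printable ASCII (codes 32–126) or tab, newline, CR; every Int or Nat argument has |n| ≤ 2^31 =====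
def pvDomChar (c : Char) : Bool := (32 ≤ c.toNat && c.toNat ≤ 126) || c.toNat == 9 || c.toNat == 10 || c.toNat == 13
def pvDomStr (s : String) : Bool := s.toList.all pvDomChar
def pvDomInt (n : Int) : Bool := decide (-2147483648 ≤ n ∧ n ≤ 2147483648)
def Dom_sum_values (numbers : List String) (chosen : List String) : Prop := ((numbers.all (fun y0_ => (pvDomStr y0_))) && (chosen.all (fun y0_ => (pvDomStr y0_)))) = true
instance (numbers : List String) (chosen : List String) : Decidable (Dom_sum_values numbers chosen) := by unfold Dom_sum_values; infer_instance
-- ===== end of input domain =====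

-- B replaces the reversed inner loop with its explicit base multiplier by a forward
-- Horner accumulation, and precomputes the set of single-char chosen strings once.

-- ===== PORT A =====
-- reversed positional loop: state (num_value, base), digits taken right-to-left
def sum_values (numbers : List String) (chosen : List String) : Int :=
  numbers.foldl (fun total_sum num =>
    let st := num.toList.reverse.foldl (fun (st : Int × Int) digit =>
      let value : Int :=
        if digit.isDigit then ((digit.toNat : Int) - 48)
        else 10 + (digit.toNat : Int) - 65
      let value : Int := if chosen.contains (String.ofList [digit]) then 35 else value
      (st.1 + value * st.2, st.2 * 36)) ((0 : Int), (1 : Int))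
    total_sum + st.1) 0

-- ===== PORT B =====
def sv_val (boost : PySem.Set String) (ch : Char) : Int :=
  if PySem.Set.contains boost (String.ofList [ch]) then 35
  else if ch.isDigit then ((ch.toNat : Int) - 48)
  else 10 + (ch.toNat : Int) - 65

def sum_values_alt (numbers : List String) (chosen : List String) : Int :=
  let boost := PySem.Set.ofList (chosen.filter (fun c => c.toList.length == 1))
  numbers.foldl (fun total num =>
    total + num.toList.foldl (fun v ch => v * 36 + sv_val boost ch) 0) 0

-- ===== PRECONDITION & SPEC =====
def Spec_sum_values (numbers : List String) (chosen : List String) (out : Int) : Prop := out = sum_values_alt numbers chosen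
instance (numbers : List String) (chosen : List String) (out : Int) : Decidable (Spec_sum_values numbers chosen out) := by unfold Spec_sum_values; infer_instance

-- ===== CLAIM (what is proved, stated in full; the proofs are below) =====
def Claim_equal_sum_values : Prop := ∀ (numbers : List String) (chosen : List String), Dom_sum_values numbers chosen → Spec_sum_values numbers chosen (sum_values numbers chosen)

-- ===== LEMMAS AND PROOFS =====

-- per-character values agree: the precomputed set of single-char chosen strings
-- answers the same membership question as scanning the chosen list
theorem sv_val_eq (chosen : List String) (ch : Char) :
    sv_val (PySem.Set.ofList (chosen.filter (fun c => c.toList.length == 1))) ch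
      = (if chosen.contains (String.ofList [ch]) then (35 : Int)
         else if ch.isDigit then ((ch.toNat : Int) - 48) else 10 + (ch.toNat : Int) - 65) := by
  simp [sv_val, PySem.Set.contains, PySem.Set.mem_ofList, List.mem_filter]

-- Horner fold with an arbitrary starting accumulator
theorem horner_shift (f : Char → Int) (l : List Char) (v : Int) :
    l.foldl (fun v ch => v * 36 + f ch) v
      = v * 36 ^ l.length + l.foldl (fun v ch => v * 36 + f ch) 0 := by
  induction l generalizing v with
  | nil => simp
  | cons c t ih =>
    simp only [List.foldl_cons, List.length_cons]
    rw [ih (v * 36 + f c), ih (0 * 36 + f c)]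
    ring

-- the reversed positional loop computes exactly the Horner value
theorem rev_loop_eq (f : Char → Int) (l : List Char) (a b : Int) :
    l.reverse.foldl (fun (st : Int × Int) digit => (st.1 + f digit * st.2, st.2 * 36)) (a, b)
      = (a + b * l.foldl (fun v ch => v * 36 + f ch) 0, b * 36 ^ l.length) := by
  induction l generalizing a b with
  | nil => simp
  | cons c t ih =>
    simp only [List.reverse_cons, List.foldl_append, List.foldl_cons, List.foldl_nil,
      List.length_cons]
    rw [ih a b, horner_shift f t (0 * 36 + f c)]
    simp only [Prod.mk.injEq]
    constructor <;> ring

-- one number: A's inner loop equals B's inner loop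
theorem inner_eq (chosen : List String) (num : List Char) :
    (num.reverse.foldl (fun (st : Int × Int) digit =>
        (st.1 + (if chosen.contains (String.ofList [digit]) then (35 : Int)
          else if digit.isDigit then ((digit.toNat : Int) - 48)
          else 10 + (digit.toNat : Int) - 65) * st.2,
         st.2 * 36)) ((0 : Int), (1 : Int))).1
      = num.foldl (fun v ch =>
          v * 36 + sv_val (PySem.Set.ofList (chosen.filter (fun c => c.toList.length == 1))) ch) 0 := by
  rw [rev_loop_eq]
  simp only [one_mul, zero_add]
  have hf : (fun (v : Int) (ch : Char) =>
      v * 36 + (if chosen.contains (String.ofList [ch]) then (35 : Int)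
        else if ch.isDigit then ((ch.toNat : Int) - 48) else 10 + (ch.toNat : Int) - 65))
    = (fun (v : Int) (ch : Char) =>
      v * 36 + sv_val (PySem.Set.ofList (chosen.filter (fun c => c.toList.length == 1))) ch) := by
    funext v ch
    rw [sv_val_eq]
  rw [hf]

theorem sum_values_eq_alt (numbers chosen : List String) :
    sum_values numbers chosen = sum_values_alt numbers chosen := by
  show numbers.foldl (fun total_sum num =>
      total_sum + (num.toList.reverse.foldl (fun (st : Int × Int) digit =>
        (st.1 + (if chosen.contains (String.ofList [digit]) then (35 : Int)
          else if digit.isDigit then ((digit.toNat : Int) - 48)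
          else 10 + (digit.toNat : Int) - 65) * st.2,
         st.2 * 36)) ((0 : Int), (1 : Int))).1) 0
    = numbers.foldl (fun total num =>
        total + num.toList.foldl (fun v ch =>
          v * 36 + sv_val (PySem.Set.ofList (chosen.filter (fun c => c.toList.length == 1))) ch) 0) 0
  have hstep : (fun (total_sum : Int) (num : String) =>
      total_sum + (num.toList.reverse.foldl (fun (st : Int × Int) digit =>
        (st.1 + (if chosen.contains (String.ofList [digit]) then (35 : Int)
          else if digit.isDigit then ((digit.toNat : Int) - 48)
          else 10 + (digit.toNat : Int) - 65) * st.2,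
         st.2 * 36)) ((0 : Int), (1 : Int))).1)
    = (fun (total : Int) (num : String) =>
        total + num.toList.foldl (fun v ch =>
          v * 36 + sv_val (PySem.Set.ofList (chosen.filter (fun c => c.toList.length == 1))) ch) 0) := by
    funext total num
    rw [inner_eq]
  rw [hstep]

-- ===== VERDICT (by name: the statement is the Claim_ definition above) =====
theorem sum_values_spec : Claim_equal_sum_values := by
  intro numbers chosen _
  unfold Spec_sum_values
  exact sum_values_eq_alt numbers chosen
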